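-- pv_equiv track=rewrite | github.com/SheraramPrajapat1998/DSA_GFG | 8. Hashing/P2 Intersection of Two Unsorted Arrays.py | find_intersection_of_arr
-- ===== SOURCE A (Python) =====
-- def find_intersection_of_arr(arr1, arr2):
--     hashmap = {}
--     for element in arr1:
--         hashmap[element] = hashmap.get(element, 0) + 1
--
--     count = 0
--     for element in arr2:
--         if element in hashmap and hashmap[element]:
--             del hashmap[element]
--             count += 1
--     return count
-- ===== SOURCE B (Python) =====
-- def find_intersection_of_arr(arr1, arr2):
--     a = sorted(arr1)
--     b = sorted(arr2)
--     i = j = count = 0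
--     while i < len(a) and j < len(b):
--         if a[i] < b[j]:
--             i += 1
--         elif b[j] < a[i]:
--             j += 1
--         else:
--             v = a[i]
--             count += 1
--             while i < len(a) and a[i] == v:
--                 i += 1
--             while j < len(b) and b[j] == v:
--                 j += 1
--     return count
-- ===== Notes on version B (the rewrite author's own statement) =====
-- stated objective: alternative
-- what changed: Replaces the hash-based count-dict plus match-and-delete loop with sort-then-merge: sort both arrays and count distinct common values with a two-pointer scan that skips duplicate runs.
import Mathlib
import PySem

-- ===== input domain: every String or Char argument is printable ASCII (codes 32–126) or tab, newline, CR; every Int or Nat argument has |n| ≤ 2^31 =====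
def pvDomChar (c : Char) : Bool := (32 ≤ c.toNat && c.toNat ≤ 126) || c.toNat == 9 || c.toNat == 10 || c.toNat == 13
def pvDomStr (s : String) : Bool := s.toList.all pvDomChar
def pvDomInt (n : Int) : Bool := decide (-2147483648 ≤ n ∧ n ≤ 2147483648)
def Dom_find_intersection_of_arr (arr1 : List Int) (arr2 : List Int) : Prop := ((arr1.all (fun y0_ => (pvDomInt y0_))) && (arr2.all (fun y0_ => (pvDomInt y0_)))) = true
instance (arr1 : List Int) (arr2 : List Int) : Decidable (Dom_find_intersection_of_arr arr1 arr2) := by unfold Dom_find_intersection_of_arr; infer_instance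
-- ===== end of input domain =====

-- B replaces A's hash-counting with sort-then-merge: both arrays are sorted and a
-- two-pointer scan counts distinct common values, skipping duplicate runs; an
-- alternative algorithm of similar cost (O((n+m)log(n+m)) vs A's O(n+m)).

-- ===== PORT A =====
def find_intersection_of_arr (arr1 : List Int) (arr2 : List Int) : Int :=
  let hashmap : PySem.Dict Int Int :=
    arr1.foldl (fun d element => d.insert element (d.getD element 0 + 1)) PySem.Dict.empty
  let r := arr2.foldl
    (fun (st : PySem.Dict Int Int × Int) element =>
      if st.1.contains element && st.1.getD element 0 != 0
      then (st.1.erase element, st.2 + 1)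
      else st)
    (hashmap, 0)
  r.2

-- ===== PORT B =====
-- the two-pointer while loop of Source B: the suffixes a[i:], b[j:] are the two list
-- arguments; the inner duplicate-skipping while loops are the dropWhile calls
def pvMergeCount : List Int → List Int → Int
  | [], _ => 0
  | _ :: _, [] => 0
  | x :: xs, y :: ys =>
    if x < y then pvMergeCount xs (y :: ys)
    else if y < x then pvMergeCount (x :: xs) ys
    else 1 + pvMergeCount (xs.dropWhile (fun z => z == x)) (ys.dropWhile (fun z => z == x))
termination_by a b => a.length + b.length
decreasing_by
  all_goals
    have h1 := List.length_dropWhile_le (fun z => z == x) xs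
    have h2 := List.length_dropWhile_le (fun z => z == x) ys
    simp only [List.length_cons] at *
    omega

def find_intersection_of_arr_alt (arr1 : List Int) (arr2 : List Int) : Int :=
  pvMergeCount (PySem.List.sorted arr1 (fun v => v) false) (PySem.List.sorted arr2 (fun v => v) false)

-- ===== PRECONDITION & SPEC =====
def Spec_find_intersection_of_arr (arr1 : List Int) (arr2 : List Int) (out : Int) : Prop := out = find_intersection_of_arr_alt arr1 arr2
instance (arr1 : List Int) (arr2 : List Int) (out : Int) : Decidable (Spec_find_intersection_of_arr arr1 arr2 out) := by unfold Spec_find_intersection_of_arr; infer_instance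

-- ===== CLAIM =====
def Claim_equal_find_intersection_of_arr : Prop := ∀ (arr1 : List Int) (arr2 : List Int), Dom_find_intersection_of_arr arr1 arr2 → Spec_find_intersection_of_arr arr1 arr2 (find_intersection_of_arr arr1 arr2)

-- ===== LEMMAS AND PROOFS =====

-- ---- A side: the arr2 loop counts the distinct keys of the counter that occur in arr2 ----

theorem pv_keys_erase (d : PySem.Dict Int Int) (e : Int) :
    (d.erase e).keys = d.keys.filter (fun x => !(x == e)) := by
  simp only [PySem.Dict.keys, PySem.Dict.erase, List.filter_map]
  rfl

theorem pv_find?_erase (l : List (Int × Int)) (e k : Int) (h : k ≠ e) :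
    List.find? (fun a => decide ((!a.1 == e) = true ∧ (a.1 == k) = true)) l = List.find? (fun p => p.1 == k) l := by
  induction l with
  | nil => rfl
  | cons a l ih =>
    rw [List.find?_cons, List.find?_cons]
    by_cases ha : a.1 = k
    · have h1 : (decide ((!a.1 == e) = true ∧ (a.1 == k) = true)) = true := by simp [ha, h]
      have h2 : (a.1 == k) = true := by simp [ha]
      rw [h1, h2]
    · have h1 : (decide ((!a.1 == e) = true ∧ (a.1 == k) = true)) = false := by simp [ha]
      have h2 : (a.1 == k) = false := by simp [ha]
      rw [h1, h2, ih]

theorem pv_getD_erase_of_ne (d : PySem.Dict Int Int) (e k : Int) (h : k ≠ e) :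
    (d.erase e).getD k 0 = d.getD k 0 := by
  simp only [PySem.Dict.getD, PySem.Dict.get?, PySem.Dict.erase, List.find?_filter]
  rw [pv_find?_erase d.items e k h]

theorem pv_key_split (K : List Int) (e : Int) (l : List Int) (hK : K.Nodup) (he : e ∈ K) :
    (K.filter (fun x => decide (x ∈ e :: l))).length
      = ((K.filter (fun x => !(x == e))).filter (fun x => decide (x ∈ l))).length + 1 := by
  induction K with
  | nil => cases he
  | cons k K ih =>
    rcases List.nodup_cons.mp hK with ⟨hkK, hKnd⟩
    by_cases hk : k = e
    · subst hk
      have hnot : ∀ x ∈ K, x ≠ k := fun x hx hxk => hkK (hxk ▸ hx)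
      have h1 : K.filter (fun x => decide (x ∈ k :: l)) = K.filter (fun x => decide (x ∈ l)) := by
        apply List.filter_congr
        intro x hx
        simp [List.mem_cons, hnot x hx]
      have h2 : K.filter (fun x => !(x == k)) = K := by
        apply List.filter_eq_self.mpr
        intro x hx
        simp [hnot x hx]
      rw [List.filter_cons_of_pos (by simp), List.filter_cons_of_neg (by simp), h1, h2]
      simp
    · have he' : e ∈ K := by
        rcases List.mem_cons.mp he with h | h
        · exact absurd h.symm hk
        · exact h
      have ihe := ih hKnd he'
      rw [List.filter_cons_of_pos (p := fun x => !(x == e)) (by simp [hk])]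
      by_cases hkl : k ∈ l
      · rw [List.filter_cons_of_pos (by simp [hkl]), List.filter_cons_of_pos (by simp [hkl]),
          List.length_cons, List.length_cons, ihe]
      · rw [List.filter_cons_of_neg (by simp [hk, hkl]), List.filter_cons_of_neg (by simp [hkl])]
        exact ihe

theorem pv_loop_spec (l : List Int) : ∀ (d : PySem.Dict Int Int) (c : Int),
    d.keys.Nodup → (∀ k ∈ d.keys, d.getD k 0 ≠ 0) →
    (l.foldl
      (fun (st : PySem.Dict Int Int × Int) element =>
        if st.1.contains element && st.1.getD element 0 != 0
        then (st.1.erase element, st.2 + 1)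
        else st) (d, c)).2
    = c + ((d.keys.filter (fun x => decide (x ∈ l))).length : Int) := by
  induction l with
  | nil => intro d c _ _; simp
  | cons e l ih =>
    intro d c hnd hpos
    rw [List.foldl_cons]
    by_cases hc : d.contains e = true
    · have hke : e ∈ d.keys := (PySem.Dict.contains_iff_mem_keys d e).mp hc
      have hne : d.getD e 0 ≠ 0 := hpos e hke
      have hbranch : (d.contains e && d.getD e 0 != 0) = true := by simp [hc, hne]
      rw [if_pos hbranch]
      have hnd' : (d.erase e).keys.Nodup := by
        rw [pv_keys_erase]; exact hnd.filter _
      have hpos' : ∀ k ∈ (d.erase e).keys, (d.erase e).getD k 0 ≠ 0 := by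
        intro k hk
        rw [pv_keys_erase] at hk
        rcases List.mem_filter.mp hk with ⟨hkK, hkne⟩
        have hkne' : k ≠ e := by simpa using hkne
        rw [pv_getD_erase_of_ne d e k hkne']
        exact hpos k hkK
      rw [ih (d.erase e) (c + 1) hnd' hpos']
      rw [pv_keys_erase]
      rw [pv_key_split d.keys e l hnd hke]
      push_cast
      ring
    · have hbranch : (d.contains e && d.getD e 0 != 0) = false := by
        simp [Bool.eq_false_iff.mpr hc]
      rw [if_neg (by simp [hbranch])]
      rw [ih d c hnd hpos]
      have hnk : e ∉ d.keys := fun h =>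
        hc ((PySem.Dict.contains_iff_mem_keys d e).mpr h)
      have : d.keys.filter (fun x => decide (x ∈ e :: l)) = d.keys.filter (fun x => decide (x ∈ l)) := by
        apply List.filter_congr
        intro x hx
        have : x ≠ e := fun hxe => hnk (hxe ▸ hx)
        simp [List.mem_cons, this]
      rw [this]

-- ---- B side: the merge scan counts the card of the finset intersection ----

-- after dropping the run of x's, every remaining element is strictly above x
theorem pv_dw_gt (l : List Int) (x : Int) (hs : l.Pairwise (· ≤ ·)) (hge : ∀ y ∈ l, x ≤ y) :
    ∀ y ∈ l.dropWhile (fun z => z == x), x < y := by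
  induction l with
  | nil => intro y hy; simp [List.dropWhile] at hy
  | cons h t ih =>
    rcases List.pairwise_cons.mp hs with ⟨hht, hts⟩
    by_cases hhx : h = x
    · intro y hy
      rw [List.dropWhile_cons_of_pos (by simp [hhx])] at hy
      exact ih hts (fun y hy' => hge y (List.mem_cons_of_mem h hy')) y hy
    · intro y hy
      rw [List.dropWhile_cons_of_neg (by simp [hhx])] at hy
      have hxh : x < h := lt_of_le_of_ne (hge h (List.mem_cons_self)) (Ne.symm hhx)
      rcases List.mem_cons.mp hy with rfl | hy'
      · exact hxh
      · exact lt_of_lt_of_le hxh (hht y hy')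

theorem pv_dw_insert (l : List Int) (x : Int) :
    insert x l.toFinset = insert x (l.dropWhile (fun z => z == x)).toFinset := by
  ext y
  simp only [Finset.mem_insert, List.mem_toFinset]
  constructor
  · rintro (rfl | hy)
    · exact Or.inl rfl
    · rw [← List.takeWhile_append_dropWhile (p := fun z => z == x) (l := l)] at hy
      rcases List.mem_append.mp hy with h | h
      · have := List.mem_takeWhile_imp h
        simp at this
        exact Or.inl this
      · exact Or.inr h
  · rintro (rfl | hy)
    · exact Or.inl rfl
    · exact Or.inr ((List.dropWhile_sublist _).mem hy)

theorem pv_merge_spec : ∀ (a b : List Int), a.Pairwise (· ≤ ·) → b.Pairwise (· ≤ ·) →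
    pvMergeCount a b = ((a.toFinset ∩ b.toFinset).card : Int) := by
  intro a b
  fun_induction pvMergeCount a b with
  | case1 b => intro _ _; simp
  | case2 x xs => intro _ _; simp
  | case3 x xs y ys hlt ih =>
    intro ha hb
    rcases List.pairwise_cons.mp ha with ⟨_, has⟩
    have hnx : x ∉ (y :: ys).toFinset := by
      intro hmem
      rcases List.mem_cons.mp (List.mem_toFinset.mp hmem) with rfl | h
      · exact absurd hlt (lt_irrefl x)
      · rcases List.pairwise_cons.mp hb with ⟨hyb, _⟩
        have := hyb x h
        omega
    rw [ih has hb]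
    congr 2
    have hnx' : x ∉ insert y ys.toFinset := by simpa using hnx
    simp only [List.toFinset_cons]
    exact (Finset.insert_inter_of_notMem hnx').symm
  | case4 x xs y ys hlt hlt2 ih =>
    intro ha hb
    rcases List.pairwise_cons.mp hb with ⟨_, hbs⟩
    have hny : y ∉ (x :: xs).toFinset := by
      intro hmem
      rcases List.mem_cons.mp (List.mem_toFinset.mp hmem) with rfl | h
      · exact absurd hlt2 (lt_irrefl y)
      · rcases List.pairwise_cons.mp ha with ⟨hxa, _⟩
        have := hxa y h
        omega
    rw [ih ha hbs]
    congr 2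
    have hny' : y ∉ insert x xs.toFinset := by simpa using hny
    simp only [List.toFinset_cons]
    exact (Finset.inter_insert_of_notMem hny').symm
  | case5 x xs y ys hlt hlt2 ih =>
    intro ha hb
    have hxy : x = y := by omega
    subst hxy
    rcases List.pairwise_cons.mp ha with ⟨hxa, has⟩
    rcases List.pairwise_cons.mp hb with ⟨hxb, hbs⟩
    have has' : (xs.dropWhile (fun z => z == x)).Pairwise (· ≤ ·) :=
      List.Pairwise.sublist (List.dropWhile_sublist _) has
    have hbs' : (ys.dropWhile (fun z => z == x)).Pairwise (· ≤ ·) :=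
      List.Pairwise.sublist (List.dropWhile_sublist _) hbs
    have hgx := pv_dw_gt xs x has hxa
    have hgy := pv_dw_gt ys x hbs hxb
    have hnx1 : x ∉ (xs.dropWhile (fun z => z == x)).toFinset := by
      intro h
      exact absurd (hgx x (List.mem_toFinset.mp h)) (lt_irrefl x)
    have hnx2 : x ∉ (ys.dropWhile (fun z => z == x)).toFinset := by
      intro h
      exact absurd (hgy x (List.mem_toFinset.mp h)) (lt_irrefl x)
    rw [ih has' hbs']
    have heq1 : (x :: xs).toFinset = insert x (xs.dropWhile (fun z => z == x)).toFinset := by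
      simp only [List.toFinset_cons]; exact pv_dw_insert xs x
    have heq2 : (x :: ys).toFinset = insert x (ys.dropWhile (fun z => z == x)).toFinset := by
      simp only [List.toFinset_cons]; exact pv_dw_insert ys x
    have hii : insert x (xs.dropWhile (fun z => z == x)).toFinset ∩ insert x (ys.dropWhile (fun z => z == x)).toFinset
        = insert x ((xs.dropWhile (fun z => z == x)).toFinset ∩ (ys.dropWhile (fun z => z == x)).toFinset) := by
      ext z; simp; tauto
    rw [heq1, heq2, hii]
    rw [Finset.card_insert_of_notMem (by simp [hnx1, hnx2])]
    push_cast
    ring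

-- ---- bridge: distinct-common count as a finset card ----

theorem pv_filter_card (arr1 arr2 : List Int) :
    (((PySem.Set.ofList arr1).filter (fun x => decide (x ∈ arr2))).length : Int)
      = ((arr1.toFinset ∩ arr2.toFinset).card : Int) := by
  have hnd : ((PySem.Set.ofList arr1).filter (fun x => decide (x ∈ arr2))).Nodup :=
    (PySem.Set.nodup_ofList arr1).filter _
  rw [← List.toFinset_card_of_nodup hnd]
  congr 2
  ext y
  simp only [List.mem_toFinset, List.mem_filter, Finset.mem_inter, List.mem_toFinset,
    PySem.Set.mem_ofList, decide_eq_true_eq]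

-- ===== VERDICT =====
theorem find_intersection_of_arr_spec : Claim_equal_find_intersection_of_arr := by
  intro arr1 arr2 _
  unfold Spec_find_intersection_of_arr find_intersection_of_arr find_intersection_of_arr_alt
  have hcounter : arr1.foldl (fun d element => d.insert element (d.getD element 0 + 1)) PySem.Dict.empty
      = PySem.Dict.counter arr1 := PySem.Dict.foldl_insert_getD_add_one_eq_counter arr1
  rw [hcounter]
  have hkeys : (PySem.Dict.counter arr1).keys = PySem.Set.ofList arr1 := PySem.Dict.keys_counter arr1
  have hnd : (PySem.Dict.counter arr1).keys.Nodup := PySem.Dict.nodup_keys_counter arr1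
  have hpos : ∀ k ∈ (PySem.Dict.counter arr1).keys, (PySem.Dict.counter arr1).getD k 0 ≠ 0 := by
    intro k hk
    rw [hkeys] at hk
    have hk1 : k ∈ arr1 := (PySem.Set.mem_ofList arr1 k).mp hk
    rw [PySem.Dict.getD_counter]
    have := List.count_pos_iff.mpr hk1
    omega
  rw [pv_loop_spec arr2 (PySem.Dict.counter arr1) 0 hnd hpos, hkeys]
  have hp1 : (PySem.List.sorted arr1 (fun v => v) false).Pairwise (· ≤ ·) := by
    simpa using PySem.List.sorted_pairwise arr1 (fun v => v)
  have hp2 : (PySem.List.sorted arr2 (fun v => v) false).Pairwise (· ≤ ·) := by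
    simpa using PySem.List.sorted_pairwise arr2 (fun v => v)
  rw [pv_merge_spec _ _ hp1 hp2]
  rw [List.toFinset_eq_of_perm _ _ (PySem.List.sorted_perm arr1 (fun v => v) false),
      List.toFinset_eq_of_perm _ _ (PySem.List.sorted_perm arr2 (fun v => v) false)]
  rw [pv_filter_card arr1 arr2]
  ring
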